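-- pv_equiv track=rewrite | github.com/LeeClayberg/Advent-of-Code | 2020/Day10_b.py | find_choices_rec
-- ===== SOURCE A (Python) =====
-- def find_choices_rec(idx, num):
--     if num < 3:
--         return 1
--     choices = 1
--     for i in range(2, idx+1):
--         for b in range(1, int(num / i) + 1):
--             extra = num - b * i
--             choices += extra
--     return choices
-- ===== SOURCE B (Python) =====
-- def find_choices_rec(idx, num):
--     # Single down-counting loop; the inner sum of A is the closed form
--     # B*num - i*B*(B+1)//2 with B = num // i (triangular-number identity).
--     if num < 3:
--         return 1
--     total = 1
--     i = idx
--     while i >= 2: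
--         b = num // i
--         total += b * num - i * (b * (b + 1) // 2)
--         i -= 1
--     return total
-- ===== Notes on version B (the rewrite author's own statement) =====
-- stated objective: faster
-- what changed: Replaces the nested accumulation loops by a recursion on i whose step adds the closed-form triangular sum B*num - i*B*(B+1)//2, eliminating the inner loop over b entirely.
import Mathlib
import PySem

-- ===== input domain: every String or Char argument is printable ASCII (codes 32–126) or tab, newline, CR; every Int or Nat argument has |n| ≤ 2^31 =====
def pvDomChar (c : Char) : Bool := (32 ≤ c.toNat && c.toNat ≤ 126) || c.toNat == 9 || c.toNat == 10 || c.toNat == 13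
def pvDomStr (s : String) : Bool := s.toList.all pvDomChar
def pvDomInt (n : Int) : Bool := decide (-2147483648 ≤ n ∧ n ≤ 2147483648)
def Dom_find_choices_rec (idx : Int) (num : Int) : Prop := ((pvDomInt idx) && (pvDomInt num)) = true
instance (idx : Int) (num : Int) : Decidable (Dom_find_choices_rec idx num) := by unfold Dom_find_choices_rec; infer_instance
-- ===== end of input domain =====

-- B replaces A's nested accumulation loops by a single down-counting loop whose step adds the closed-form triangular sum B*num - i*B*(B+1)//2 (faster: asymptotic).


-- ===== PORT A =====
-- 'int(num / i)' is ported as floor division: exact here, since in the loop 3 ≤ num ≤ 2^31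
-- and 2 ≤ i, so the float quotient's rounding error is below the distance to the next integer.
def find_choices_rec (idx : Int) (num : Int) : Int :=
  if num < 3 then 1
  else
    (PySem.List.pyRange 2 (idx + 1) 1).foldl
      (fun choices i =>
        (PySem.List.pyRange 1 (PySem.Int.floordiv num i + 1) 1).foldl
          (fun c b => c + (num - b * i)) choices)
      1

-- ===== PORT B =====
-- The while loop counts i down from idx to 2: ported as structural recursion on i.toNat.
def fcDown (num : Int) : Nat → Int
  | 0 => 1
  | 1 => 1
  | n + 2 =>
      let i : Int := (n : Int) + 2
      let b : Int := PySem.Int.floordiv num i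
      fcDown num (n + 1) + (b * num - i * PySem.Int.floordiv (b * (b + 1)) 2)

def find_choices_rec_alt (idx : Int) (num : Int) : Int :=
  if num < 3 then 1 else fcDown num idx.toNat

-- ===== PRECONDITION & SPEC =====
def Spec_find_choices_rec (idx : Int) (num : Int) (out : Int) : Prop := out = find_choices_rec_alt idx num
instance (idx : Int) (num : Int) (out : Int) : Decidable (Spec_find_choices_rec idx num out) := by unfold Spec_find_choices_rec; infer_instance

-- ===== CLAIM (what is proved, stated in full; the proofs are below) =====
def Claim_equal_find_choices_rec : Prop := ∀ (idx : Int) (num : Int), Dom_find_choices_rec idx num → Spec_find_choices_rec idx num (find_choices_rec idx num)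

-- ===== LEMMAS AND PROOFS =====

-- triangular numbers 0 + 1 + … + n
def pvTri : Nat → Int
  | 0 => 0
  | n + 1 => pvTri n + (n + 1)

theorem pvTri_two_mul (n : Nat) : 2 * pvTri n = (n : Int) * (n + 1) := by
  induction n with
  | zero => simp [pvTri]
  | succ n ih => simp only [pvTri]; push_cast; linear_combination ih

-- A's inner loop over b, summed in closed position against pvTri
theorem pvInner (num i : Int) (n : Nat) (acc : Int) :
    (PySem.List.pyRange 1 ((n : Int) + 1) 1).foldl (fun c b => c + (num - b * i)) acc
      = acc + n * num - i * pvTri n := by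
  induction n generalizing acc with
  | zero =>
      rw [PySem.List.pyRange_one_eq_nil (by norm_num)]
      simp [pvTri]
  | succ n ih =>
      have h : ((n + 1 : Nat) : Int) + 1 = ((n : Int) + 1) + 1 := by push_cast; ring
      rw [h, PySem.List.pyRange_one_succ_right (by omega), List.foldl_append, ih]
      simp only [List.foldl, pvTri]
      push_cast
      ring

-- A's inner loop equals the closed-form term B uses
theorem pvClosed (num i : Int) (hi : 0 < i) (hn : 0 ≤ num) (acc : Int) :
    (PySem.List.pyRange 1 (PySem.Int.floordiv num i + 1) 1).foldl
        (fun c b => c + (num - b * i)) acc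
      = acc + (PySem.Int.floordiv num i * num
          - i * PySem.Int.floordiv (PySem.Int.floordiv num i * (PySem.Int.floordiv num i + 1)) 2) := by
  set B := PySem.Int.floordiv num i with hB
  have hBnn : 0 ≤ B := by
    rw [hB, PySem.Int.floordiv_eq_ediv_of_pos hi]
    exact Int.ediv_nonneg hn (le_of_lt hi)
  obtain ⟨n, hn'⟩ : ∃ n : Nat, B = (n : Int) := ⟨B.toNat, (Int.toNat_of_nonneg hBnn).symm⟩
  have hdiv : PySem.Int.floordiv (B * (B + 1)) 2 = pvTri n := by
    have : B * (B + 1) = 2 * pvTri n := by rw [hn', ← pvTri_two_mul]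
    rw [this, PySem.Int.floordiv_eq_ediv_of_pos (by norm_num), Int.mul_ediv_cancel_left _ (by norm_num)]
  rw [hn'] at hdiv ⊢
  rw [pvInner num i n acc, hdiv]
  ring

-- A's outer foldl up to (n:Int) equals B's down-counting recursion at fuel n
theorem pvOuter (num : Int) (hn : 0 ≤ num) (n : Nat) :
    (PySem.List.pyRange 2 ((n : Int) + 1) 1).foldl
        (fun choices i =>
          (PySem.List.pyRange 1 (PySem.Int.floordiv num i + 1) 1).foldl
            (fun c b => c + (num - b * i)) choices)
        1
      = fcDown num n := by
  induction n with
  | zero =>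
      rw [PySem.List.pyRange_one_eq_nil (by norm_num)]
      simp [fcDown]
  | succ n ih =>
      match n, ih with
      | 0, _ =>
          rw [show ((1 : Nat) : Int) + 1 = 2 by norm_num,
            PySem.List.pyRange_one_eq_nil (by norm_num)]
          simp [fcDown]
      | Nat.succ m, ih =>
          have h : ((m + 2 : Nat) : Int) + 1 = (((m + 1 : Nat) : Int) + 1) + 1 := by
            push_cast; ring
          rw [h, PySem.List.pyRange_one_succ_right (by push_cast; omega),
            List.foldl_append, ih]
          simp only [List.foldl]
          rw [pvClosed num (((m + 1 : Nat) : Int) + 1) (by push_cast; omega) hn]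
          show _ = fcDown num (m + 2)
          simp only [fcDown, Nat.succ_eq_add_one]
          push_cast
          ring

-- ===== VERDICT (by name: the statement is the Claim_ definition above) =====
theorem find_choices_rec_spec : Claim_equal_find_choices_rec := by
  intro idx num _
  unfold Spec_find_choices_rec find_choices_rec find_choices_rec_alt
  by_cases hlt : num < 3
  · simp [hlt]
  · simp only [hlt, if_false]
    by_cases hidx : 0 ≤ idx
    · have h : idx = ((idx.toNat : Nat) : Int) := (Int.toNat_of_nonneg hidx).symm
      rw [h]
      exact pvOuter num (by omega) idx.toNat
    · have h0 : idx.toNat = 0 := Int.toNat_of_nonpos (by omega)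
      rw [PySem.List.pyRange_one_eq_nil (by omega), h0]
      simp [fcDown]
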